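-- pv_equiv track=rewrite | github.com/pypi-data/pypi-mirror-114 | packages/fuzzytools/fuzzytools-0.0.1.tar.gz/fuzzytools-0.0.1/fuzzytools/strings.py | alphabet_count
-- ===== SOURCE A (Python) =====
-- ALPHABET = 'abcdefghijklmnopqrstuvwxyz'
--
-- def alphabet_count(k,
-- 	string_length=None,
-- 	):
-- 	assert k>=0
-- 	base = ALPHABET
-- 	base_first = base[0]
-- 	string_length = len(base) if string_length is None else string_length
-- 	assert k<len(base)**string_length
-- 	res = ""
-- 	b = len(base)
-- 	while k:
-- 		res+=base[k%b]
-- 		k//= b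
-- 	txt = res[::-1] or base_first
-- 	return base_first*(string_length-len(txt))+txt
-- ===== SOURCE B (Python) =====
-- ALPHABET = 'abcdefghijklmnopqrstuvwxyz'
--
-- def alphabet_count(k,
-- 	string_length=None,
-- 	):
-- 	assert k>=0
-- 	base = ALPHABET
-- 	b = len(base)
-- 	string_length = b if string_length is None else string_length
-- 	assert k<b**string_length
-- 	# divide and conquer on the positions: split the n requested digits in half,
-- 	# divmod splits k into the high and low halves; base[0]='a' is the zero digit,
-- 	# so left-padding falls out of hi==0.
-- 	def go(k, n):
-- 		if n <= 0:
-- 			return ''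
-- 		if n == 1:
-- 			return base[k]
-- 		m = n // 2
-- 		hi, lo = divmod(k, b**m)
-- 		return go(hi, n - m) + go(lo, m)
-- 	return go(k, string_length)
-- ===== Notes on version B (the rewrite author's own statement) =====
-- stated objective: alternative
-- what changed: Replaces A's LSB-first divide-loop plus reverse, empty-string fallback and left-padding by a divide-and-conquer over the positions: the n requested digits are split in half and divmod(k, 26**(n//2)) splits k into the two halves, with base[0]='a' as the zero digit so padding falls out of hi==0.
-- intended difference: For string_length <= 0 (where the asserts only admit k = 0) A returns 'a' - one character more than requested, an artefact of `res[::-1] or base_first` - while B returns '', the intended string of the requested non-positive length. — e.g. on alphabet_count(0, some 0): A returns "a", B returns ""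
import Mathlib
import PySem

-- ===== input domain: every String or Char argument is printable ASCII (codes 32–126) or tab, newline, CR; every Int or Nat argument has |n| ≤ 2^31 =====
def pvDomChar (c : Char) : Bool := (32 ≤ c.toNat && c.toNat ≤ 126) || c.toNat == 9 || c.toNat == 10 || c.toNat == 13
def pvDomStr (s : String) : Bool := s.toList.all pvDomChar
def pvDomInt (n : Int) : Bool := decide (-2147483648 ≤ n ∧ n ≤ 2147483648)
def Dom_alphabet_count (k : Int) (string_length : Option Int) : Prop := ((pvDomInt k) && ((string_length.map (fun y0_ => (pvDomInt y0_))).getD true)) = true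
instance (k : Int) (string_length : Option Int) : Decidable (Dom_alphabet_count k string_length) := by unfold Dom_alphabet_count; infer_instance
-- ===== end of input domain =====

-- B replaces A's LSB-first divide-loop + reverse + pad by a divide-and-conquer split of the positions (objective: alternative, same value everywhere except string_length ≤ 0, stated as D_).

-- ===== PORT A =====
def pvBase : List Char := "abcdefghijklmnopqrstuvwxyz".toList

def pvBaseGet (i : Nat) : Char := pvBase.getD i ' '

-- `while k: res += base[k%b]; k //= b` — fuel = initial k suffices (k strictly shrinks each step)
def pvLoopA : Nat → Nat → List Char → List Char
  | 0, _, res => res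
  | _ + 1, 0, res => res
  | f + 1, n + 1, res => pvLoopA f ((n + 1) / 26) (res ++ [pvBaseGet ((n + 1) % 26)])

def alphabet_count (k : Int) (string_length : Option Int) : String :=
  -- asserts `k >= 0` and `k < 26**string_length` raise outside Pre_; this is the returning path
  let L : Int := string_length.getD 26
  let res : List Char := pvLoopA k.toNat k.toNat []
  let txt : List Char := if res.reverse = [] then ['a'] else res.reverse   -- res[::-1] or base_first
  String.mk (List.replicate (L - (txt.length : Int)).toNat 'a' ++ txt)     -- 'a'*(L-len(txt)) + txt

-- ===== PORT B =====
-- go(k, n): divide and conquer on positions; fuel = n.toNat + 1 bounds the recursion depth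
def pvGoB : Nat → Nat → Int → List Char
  | 0, _, _ => []
  | f + 1, k, n =>
    if n ≤ 0 then []
    else if n = 1 then [pvBaseGet k]
    else
      -- n ≥ 2 here, so Python's n//2 agrees with Lean's Int division
      let m : Int := n / 2
      let mN : Nat := m.toNat
      pvGoB f (k / 26 ^ mN) (n - m) ++ pvGoB f (k % 26 ^ mN) m

def alphabet_count_alt (k : Int) (string_length : Option Int) : String :=
  -- asserts as in A raise outside Pre_; this is the returning path
  let L : Int := string_length.getD 26
  String.mk (pvGoB (L.toNat + 1) k.toNat L)

-- ===== PRECONDITION & SPEC =====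
-- Exactly where A returns: k ≥ 0 and k < 26**L (for L < 0 the float 26**L only admits k = 0).
-- The `7 ≤ L` disjunct: under Dom's |k| ≤ 2^31 < 26^7 it coincides with k < 26^L; stated this
-- way so Pre_ never evaluates an astronomically large power.
def Pre_alphabet_count (k : Int) (string_length : Option Int) : Prop :=
  0 ≤ k ∧ (let L := string_length.getD 26;
    if 0 ≤ L then 7 ≤ L ∨ k < (26 : Int) ^ L.toNat else k = 0)

instance (k : Int) (string_length : Option Int) : Decidable (Pre_alphabet_count k string_length) := by
  unfold Pre_alphabet_count; infer_instance

def pvWitness_alphabet_count : Int × Option Int := (27, some 3)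

-- For string_length ≤ 0 (where the asserts only admit k = 0) A returns "a" — one character more
-- than requested, an artefact of `res[::-1] or base_first` — while B returns "", the intended
-- string of the requested non-positive length.
def D_alphabet_count (k : Int) (string_length : Option Int) : Prop :=
  string_length.getD 26 ≤ 0

instance (k : Int) (string_length : Option Int) : Decidable (D_alphabet_count k string_length) := by
  unfold D_alphabet_count; infer_instance

def Spec_alphabet_count (k : Int) (string_length : Option Int) (out : String) : Prop :=
  ¬ D_alphabet_count k string_length → out = alphabet_count_alt k string_length

instance (k : Int) (string_length : Option Int) (out : String) : Decidable (Spec_alphabet_count k string_length out) := by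
  unfold Spec_alphabet_count; infer_instance

def pvDiffWitness_alphabet_count : Int × Option Int := (0, some 0)

def pvDiffWitnessOut_alphabet_count : String × String := ("a", "")

-- ===== CLAIM (what is proved, stated in full; the proofs are below) =====
def Claim_unchanged_alphabet_count : Prop := ∀ (k : Int) (string_length : Option Int), Dom_alphabet_count k string_length → Pre_alphabet_count k string_length → Spec_alphabet_count k string_length (alphabet_count k string_length)

def Claim_changed_alphabet_count : Prop := Dom_alphabet_count (pvDiffWitness_alphabet_count.1) (pvDiffWitness_alphabet_count.2) ∧ Pre_alphabet_count (pvDiffWitness_alphabet_count.1) (pvDiffWitness_alphabet_count.2) ∧ D_alphabet_count (pvDiffWitness_alphabet_count.1) (pvDiffWitness_alphabet_count.2) ∧ alphabet_count (pvDiffWitness_alphabet_count.1) (pvDiffWitness_alphabet_count.2) = pvDiffWitnessOut_alphabet_count.1 ∧ alphabet_count_alt (pvDiffWitness_alphabet_count.1) (pvDiffWitness_alphabet_count.2) = pvDiffWitnessOut_alphabet_count.2 ∧ pvDiffWitnessOut_alphabet_count.1 ≠ pvDiffWitnessOut_alphabet_count.2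

def Claim_exact_alphabet_count : Prop := ∀ (k : Int) (string_length : Option Int), Dom_alphabet_count k string_length → Pre_alphabet_count k string_length → D_alphabet_count k string_length → alphabet_count k string_length ≠ alphabet_count_alt k string_length

-- ===== LEMMAS AND PROOFS =====

-- the LSB-first digit string A's while-loop produces
def lsb : Nat → List Char
  | 0 => []
  | n + 1 => pvBaseGet ((n + 1) % 26) :: lsb ((n + 1) / 26)
  decreasing_by exact Nat.div_lt_self (Nat.succ_pos _) (by norm_num)

theorem lsb_zero : lsb 0 = [] := by rw [lsb]

theorem lsb_succ (n : Nat) : lsb (n + 1) = pvBaseGet ((n + 1) % 26) :: lsb ((n + 1) / 26) := by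
  rw [lsb]

theorem pvLoopA_spec : ∀ (fuel n : Nat) (res : List Char), n ≤ fuel →
    pvLoopA fuel n res = res ++ lsb n := by
  intro fuel
  induction fuel with
  | zero =>
    intro n res h
    have : n = 0 := Nat.le_zero.mp h
    subst this
    simp [pvLoopA, lsb_zero]
  | succ f ih =>
    intro n res h
    cases n with
    | zero => simp [pvLoopA, lsb_zero]
    | succ m =>
      have hle : (m + 1) / 26 ≤ f := by
        have := Nat.div_lt_self (Nat.succ_pos m) (by norm_num : 1 < 26)
        omega
      rw [pvLoopA, ih _ _ hle, lsb_succ]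
      simp

theorem lsb_len : ∀ (L n : Nat), n < 26 ^ L → (lsb n).length ≤ L := by
  intro L
  induction L with
  | zero =>
    intro n h
    have : n = 0 := by simpa using h
    subst this
    simp [lsb_zero]
  | succ L ih =>
    intro n h
    cases n with
    | zero => simp [lsb_zero]
    | succ m =>
      have hq : (m + 1) / 26 < 26 ^ L := by
        apply Nat.div_lt_of_lt_mul
        calc m + 1 < 26 ^ (L + 1) := h
          _ = 26 * 26 ^ L := by ring
      rw [lsb_succ]
      simpa using ih _ hq

theorem core : ∀ (L n : Nat), n < 26 ^ L →
    List.replicate (L - (lsb n).length) 'a' ++ (lsb n).reverse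
      = (List.range L).map (fun i => pvBaseGet ((n / 26 ^ (L - 1 - i)) % 26)) := by
  intro L
  induction L with
  | zero =>
    intro n h
    have : n = 0 := by simpa using h
    subst this
    simp [lsb_zero]
  | succ L ih =>
    intro n h
    have hq : n / 26 < 26 ^ L := by
      apply Nat.div_lt_of_lt_mul
      calc n < 26 ^ (L + 1) := h
        _ = 26 * 26 ^ L := by ring
    -- right side: split off the last position
    have hr : (List.range (L + 1)).map (fun i => pvBaseGet ((n / 26 ^ (L + 1 - 1 - i)) % 26))
        = (List.range L).map (fun i => pvBaseGet ((n / 26 / 26 ^ (L - 1 - i)) % 26))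
          ++ [pvBaseGet (n % 26)] := by
      rw [List.range_succ, List.map_append]
      congr 1
      · apply List.map_congr_left
        intro i hi
        have hiL : i < L := List.mem_range.mp hi
        have hpow : (26 : Nat) ^ (L + 1 - 1 - i) = 26 * 26 ^ (L - 1 - i) := by
          have : L + 1 - 1 - i = (L - 1 - i) + 1 := by omega
          rw [this, pow_succ']
        rw [hpow, ← Nat.div_div_eq_div_mul]
      · simp
    -- left side: split off the lowest digit
    have hstep : List.replicate (L + 1 - (lsb n).length) 'a' ++ (lsb n).reverse
        = (List.replicate (L - (lsb (n / 26)).length) 'a' ++ (lsb (n / 26)).reverse)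
          ++ [pvBaseGet (n % 26)] := by
      cases n with
      | zero =>
        have : pvBaseGet (0 % 26) = 'a' := by decide
        rw [this]
        simp [lsb_zero, List.replicate_succ']
      | succ m =>
        rw [lsb_succ]
        have hlen : L + 1 - ((lsb ((m + 1) / 26)).length + 1)
            = L - (lsb ((m + 1) / 26)).length := by omega
        simp [hlen, List.append_assoc]
    rw [hstep, ih _ hq, hr]

theorem mod_pow_div_mod (k m e : Nat) (h : e < m) :
    (k % 26 ^ m / 26 ^ e) % 26 = (k / 26 ^ e) % 26 := by
  conv_rhs => rw [← Nat.div_add_mod k (26 ^ m)]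
  have hsplit : (26 : Nat) ^ m * (k / 26 ^ m) = 26 ^ e * (26 ^ (m - e) * (k / 26 ^ m)) := by
    rw [← mul_assoc, ← pow_add]
    congr 2
    omega
  rw [hsplit, Nat.mul_add_div (by positivity)]
  obtain ⟨c, hc⟩ : (26 : Nat) ∣ 26 ^ (m - e) := dvd_pow_self 26 (by omega)
  rw [hc, mul_assoc, Nat.mul_add_mod]

theorem goB_spec : ∀ (f n k : Nat), n + 1 ≤ f → k < 26 ^ n →
    pvGoB f k (n : Int) = (List.range n).map (fun i => pvBaseGet ((k / 26 ^ (n - 1 - i)) % 26)) := by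
  intro f
  induction f with
  | zero => intro n k h _; omega
  | succ f ih =>
    intro n k h hk
    rw [pvGoB]
    by_cases h0 : n = 0
    · subst h0
      rw [if_pos (by omega)]
      simp
    by_cases h1 : n = 1
    · subst h1
      rw [if_neg (by omega), if_pos (by omega)]
      have : k % 26 = k := Nat.mod_eq_of_lt (by simpa using hk)
      simp [this]
    · rw [if_neg (by omega), if_neg (by omega)]
      have hn2 : 2 ≤ n := by omega
      have hm : ((n : Int) / 2) = ((n / 2 : Nat) : Int) := by omega
      set mN : Nat := n / 2 with hmN
      have hmN1 : 1 ≤ mN := by omega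
      have hmNn : mN < n := by omega
      simp only [hm, Int.toNat_natCast]
      have hsub : (n : Int) - (mN : Int) = ((n - mN : Nat) : Int) := by omega
      rw [hsub]
      have hhi : k / 26 ^ mN < 26 ^ (n - mN) := by
        apply Nat.div_lt_of_lt_mul
        calc k < 26 ^ n := hk
          _ = 26 ^ mN * 26 ^ (n - mN) := by rw [← pow_add]; congr 1; omega
      have hlo : k % 26 ^ mN < 26 ^ mN := Nat.mod_lt _ (by positivity)
      rw [ih (n - mN) _ (by omega) hhi, ih mN _ (by omega) hlo]
      have hrw : List.range n = List.range (n - mN) ++ (List.range mN).map ((n - mN) + ·) := by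
        rw [← List.range_add]
        congr 1
        omega
      rw [hrw, List.map_append, List.map_map]
      congr 1
      · apply List.map_congr_left
        intro i hi
        have hiL : i < n - mN := List.mem_range.mp hi
        have he : mN + (n - mN - 1 - i) = n - 1 - i := by omega
        rw [Nat.div_div_eq_div_mul, ← pow_add, he]
      · apply List.map_congr_left
        intro j hj
        have hjL : j < mN := List.mem_range.mp hj
        show pvBaseGet (k % 26 ^ mN / 26 ^ (mN - 1 - j) % 26) = pvBaseGet (k / 26 ^ (n - 1 - (n - mN + j)) % 26)
        have he : n - 1 - (n - mN + j) = mN - 1 - j := by omega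
        rw [he, mod_pow_div_mod k mN (mN - 1 - j) (by omega)]

theorem dom_bound (k : Int) (string_length : Option Int)
    (hdom : Dom_alphabet_count k string_length) : k ≤ 2147483648 := by
  unfold Dom_alphabet_count pvDomInt at hdom
  simp only [Bool.and_eq_true, decide_eq_true_eq] at hdom
  exact hdom.1.2

theorem main_eq (k : Int) (string_length : Option Int)
    (hdom : Dom_alphabet_count k string_length)
    (hpre : Pre_alphabet_count k string_length)
    (hD : ¬ D_alphabet_count k string_length) :
    alphabet_count k string_length = alphabet_count_alt k string_length := by
  obtain ⟨hk, hp⟩ := hpre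
  unfold D_alphabet_count at hD
  set L : Int := string_length.getD 26 with hLdef
  have hL1 : 1 ≤ L := by omega
  rw [if_pos (by omega : (0:Int) ≤ L)] at hp
  have hbound : k.toNat < 26 ^ L.toNat := by
    rcases hp with h7 | hlt
    · have hk2 : k ≤ 2147483648 := dom_bound k string_length hdom
      calc k.toNat ≤ 2147483648 := by omega
        _ < 26 ^ 7 := by norm_num
        _ ≤ 26 ^ L.toNat := Nat.pow_le_pow_right (by norm_num) (by omega)
    · have h1 : (k.toNat : Int) < (26 : Int) ^ L.toNat := by
        rwa [Int.toNat_of_nonneg hk]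
      exact_mod_cast h1
  set N : Nat := L.toNat with hNdef
  have hN1 : 1 ≤ N := by omega
  have hlenle : (lsb k.toNat).length ≤ N := lsb_len N k.toNat hbound
  have key := core N k.toNat hbound
  have hLN : ((N : Nat) : Int) = L := by omega
  have hB : alphabet_count_alt k string_length
      = String.mk ((List.range N).map (fun i => pvBaseGet ((k.toNat / 26 ^ (N - 1 - i)) % 26))) := by
    unfold alphabet_count_alt
    simp only [← hLdef, ← hNdef]
    rw [← hLN, goB_spec (N + 1) N k.toNat (le_refl _) hbound]
  rw [hB]
  unfold alphabet_count
  simp only [← hLdef]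
  apply congrArg String.mk
  rw [pvLoopA_spec k.toNat k.toNat [] le_rfl, List.nil_append]
  rcases Nat.eq_zero_or_pos k.toNat with h0 | hpos
  · rw [h0] at key ⊢
    rw [lsb_zero] at key ⊢
    have hrev : ([] : List Char).reverse = [] := rfl
    rw [hrev, if_pos rfl]
    simp only [hrev, List.length_nil, List.append_nil, Nat.sub_zero] at key
    rw [← key]
    have hc : ((L - ((['a'] : List Char).length : Int)).toNat) = N - 1 := by
      simp only [List.length_cons, List.length_nil]
      omega
    rw [hc, ← List.replicate_succ']
    congr 1
    omega
  · have hne : lsb k.toNat ≠ [] := by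
      cases h : k.toNat with
      | zero => omega
      | succ m => rw [lsb_succ]; simp
    have hrevne : (lsb k.toNat).reverse ≠ [] := by simpa using hne
    rw [if_neg hrevne]
    have hc : ((L - (((lsb k.toNat).reverse.length : Nat) : Int)).toNat)
        = N - (lsb k.toNat).length := by
      rw [List.length_reverse]
      omega
    rw [hc]
    exact key

-- ===== VERDICT (by name: the statement is the Claim_ definition above) =====
theorem alphabet_count_spec : Claim_unchanged_alphabet_count := by
  intro k string_length hdom hpre
  unfold Spec_alphabet_count
  intro hD
  exact main_eq k string_length hdom hpre hD

theorem alphabet_count_changed : Claim_changed_alphabet_count := by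
  unfold Claim_changed_alphabet_count; decide

theorem alphabet_count_tight : Claim_exact_alphabet_count := by
  intro k string_length hdom hpre hD
  obtain ⟨hk, hp⟩ := hpre
  unfold D_alphabet_count at hD
  set L : Int := string_length.getD 26 with hLdef
  have hk0 : k = 0 := by
    by_cases hL0 : (0 : Int) ≤ L
    · rw [if_pos hL0] at hp
      rcases hp with h7 | hlt
      · omega
      · have hL0' : L = 0 := by omega
        rw [hL0'] at hlt
        simp at hlt
        omega
    · rw [if_neg hL0] at hp
      exact hp
  subst hk0
  have hB0 : alphabet_count_alt 0 string_length = String.mk [] := by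
    unfold alphabet_count_alt
    simp only [← hLdef]
    have h3 : L.toNat = 0 := by omega
    rw [h3]
    rw [pvGoB, if_pos hD]
  rw [hB0]
  unfold alphabet_count
  simp only [← hLdef]
  have h1 : (0 : Int).toNat = 0 := rfl
  rw [h1]
  have h2 : pvLoopA 0 0 [] = [] := rfl
  rw [h2]
  have hrev : ([] : List Char).reverse = [] := rfl
  rw [hrev, if_pos rfl]
  have h4 : ((L - ((['a'] : List Char).length : Int)).toNat) = 0 := by
    simp only [List.length_cons, List.length_nil]
    omega
  rw [h4]
  decide
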